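-- pv_equiv track=rewrite | github.com/sarikiras/matrice-word-searches | diagonale.py | grid_sup
-- ===== SOURCE A (Python) =====
-- def grid_sup(grid, n):              # very good!
--     liste = []
--     for k in range(1, n):
--         ligne = []
--         for i in range(n-k):
--             ligne.append(grid[i][i+k])
--         liste.append(ligne)
--     return liste
-- ===== SOURCE B (Python) =====
-- def grid_sup(grid, n):
--     # Row-major scan scattering each cell into its diagonal bucket (offset j-i-1).
--     liste = [[] for _ in range(1, n)]
--     for i in range(n):
--         for j in range(i + 1, n):
--             liste[j - i - 1].append(grid[i][j])
--     return liste
-- ===== Notes on version B (the rewrite author's own statement) =====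
-- stated objective: alternative
-- what changed: A iterates diagonal-major (outer loop over offset k with a computed inner range); B pre-allocates one empty bucket per diagonal and does a single row-major scan, scattering each cell grid[i][j] (j>i) into bucket j-i-1.
import Mathlib
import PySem

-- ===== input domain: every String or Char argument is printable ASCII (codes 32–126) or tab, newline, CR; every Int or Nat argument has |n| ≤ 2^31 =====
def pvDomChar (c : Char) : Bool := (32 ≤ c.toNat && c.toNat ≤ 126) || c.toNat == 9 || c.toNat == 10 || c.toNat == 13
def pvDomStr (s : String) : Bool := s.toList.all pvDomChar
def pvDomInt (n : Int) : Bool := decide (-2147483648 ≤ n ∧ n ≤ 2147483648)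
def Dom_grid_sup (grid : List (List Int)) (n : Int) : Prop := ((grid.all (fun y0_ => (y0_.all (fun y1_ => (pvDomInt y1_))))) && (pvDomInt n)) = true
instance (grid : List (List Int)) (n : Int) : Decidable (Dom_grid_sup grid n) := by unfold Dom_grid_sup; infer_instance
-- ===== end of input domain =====

-- B replaces A's diagonal-major double loop by a single row-major scan that scatters
-- each cell grid[i][j] (j > i) into the bucket for diagonal offset j-i-1 (objective: alternative).

-- ===== PORT A =====
-- grid[i][i+k], read with default 0 / [] (Pre_ guarantees the indices are in range)
def pvCell (grid : List (List Int)) (i j : Int) : Int :=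
  PySem.List.pyGetD (PySem.List.pyGetD grid i []) j 0

def grid_sup (grid : List (List Int)) (n : Int) : List (List Int) :=
  (PySem.List.pyRange 1 n 1).foldl (fun liste k =>
    liste ++ [(PySem.List.pyRange 0 (n - k) 1).foldl (fun ligne i =>
      ligne ++ [pvCell grid i (i + k)]) []]) []

-- ===== PORT B =====
def grid_sup_alt (grid : List (List Int)) (n : Int) : List (List Int) :=
  let init : List (List Int) := (PySem.List.pyRange 1 n 1).map (fun _ => [])
  (PySem.List.pyRange 0 n 1).foldl (fun liste i =>
    (PySem.List.pyRange (i + 1) n 1).foldl (fun l j =>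
      l.modify (j - i - 1).toNat (fun b => b ++ [pvCell grid i j])) liste) init

-- ===== PRECONDITION & SPEC =====
-- Pre_ excludes exactly the inputs where the Python A raises IndexError: for n ≥ 2 it
-- reads rows 0..n-2 and in each of them columns up to n-1.
def Pre_grid_sup (grid : List (List Int)) (n : Int) : Prop :=
  n ≤ 1 ∨ (n - 1 ≤ (grid.length : Int) ∧ ∀ row ∈ grid.take (n - 1).toNat, n ≤ (row.length : Int))
instance (grid : List (List Int)) (n : Int) : Decidable (Pre_grid_sup grid n) := by
  unfold Pre_grid_sup; infer_instance

def pvWitness_grid_sup : List (List Int) × Int := ([[1, 2], [3, 4]], 2)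

def Spec_grid_sup (grid : List (List Int)) (n : Int) (out : List (List Int)) : Prop := out = grid_sup_alt grid n
instance (grid : List (List Int)) (n : Int) (out : List (List Int)) : Decidable (Spec_grid_sup grid n out) := by unfold Spec_grid_sup; infer_instance

-- ===== CLAIM (what is proved, stated in full; the proofs are below) =====
def Claim_equal_grid_sup : Prop := ∀ (grid : List (List Int)) (n : Int), Dom_grid_sup grid n → Pre_grid_sup grid n → Spec_grid_sup grid n (grid_sup grid n)

-- ===== LEMMAS AND PROOFS =====

-- mapIdx fusion and identity helpers
theorem pv_mapIdx_mapIdx {α : Type} (L : List α) (f g : Nat → α → α) :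
    (L.mapIdx f).mapIdx g = L.mapIdx (fun d b => g d (f d b)) := by
  apply List.ext_getElem <;> simp

theorem pv_mapIdx_modify {α : Type} (L : List α) (t : Nat) (h : α → α) (g : Nat → α → α)
    (g' : Nat → α → α)
    (hlen : ∀ d : Nat, d < L.length → d ≠ t → g d = g' d)
    (ht : ∀ h2 : t < L.length, g t (h (L.get ⟨t, h2⟩)) = g' t (L.get ⟨t, h2⟩)) :
    (L.modify t h).mapIdx g = L.mapIdx g' := by
  apply List.ext_getElem
  · simp
  · intro d h1 h2
    have h1' : d < L.length := by simpa using h1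
    simp only [List.getElem_mapIdx, List.getElem_modify]
    by_cases hd : d = t
    · subst hd
      rw [if_pos rfl]
      simpa using ht h1'
    · rw [if_neg (fun he => hd he.symm), hlen d h1' hd]

-- A's result as a nested map
theorem pv_A_eq_map (grid : List (List Int)) (n : Int) :
    grid_sup grid n =
      (PySem.List.pyRange 1 n 1).map (fun k =>
        (PySem.List.pyRange 0 (n - k) 1).map (fun i => pvCell grid i (i + k))) := by
  unfold grid_sup
  rw [PySem.List.foldl_append_singleton_eq_map]
  simp only [List.nil_append]
  apply List.map_congr_left
  intro k _
  rw [PySem.List.foldl_append_singleton_eq_map]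
  simp

-- pointwise congruence for mapIdx
theorem pv_mapIdx_congr {α : Type} (L : List α) (f g : Nat → α → α)
    (h : ∀ d : Nat, d < L.length → ∀ b, f d b = g d b) :
    L.mapIdx f = L.mapIdx g := by
  apply List.ext_getElem
  · simp
  · intro d h1 h2
    have h1' : d < L.length := by simpa using h1
    simp only [List.getElem_mapIdx]
    exact h d h1' _

-- inner loop of B: row i scatters one element into each bucket d with j0-i-1 ≤ d < n-i-1
theorem pv_B_inner (grid : List (List Int)) (n i : Int) :
    ∀ (j0 : Int), i + 1 ≤ j0 → ∀ (L : List (List Int)),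
      (PySem.List.pyRange j0 n 1).foldl (fun l j =>
          l.modify (j - i - 1).toNat (fun b => b ++ [pvCell grid i j])) L
      = L.mapIdx (fun d b =>
          if j0 - i - 1 ≤ (d : Int) ∧ (d : Int) < n - i - 1 then b ++ [pvCell grid i (i + d + 1)] else b) := by
  suffices H : ∀ (fuel : Nat) (j0 : Int), (n - j0).toNat = fuel → i + 1 ≤ j0 →
      ∀ (L : List (List Int)),
      (PySem.List.pyRange j0 n 1).foldl (fun l j =>
          l.modify (j - i - 1).toNat (fun b => b ++ [pvCell grid i j])) L
      = L.mapIdx (fun d b =>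
          if j0 - i - 1 ≤ (d : Int) ∧ (d : Int) < n - i - 1 then b ++ [pvCell grid i (i + d + 1)] else b) by
    intro j0 hj L; exact H _ j0 rfl hj L
  intro fuel
  induction fuel with
  | zero =>
    intro j0 hf hj L
    have hnj : n ≤ j0 := by omega
    rw [PySem.List.pyRange_one_eq_nil hnj]
    simp only [List.foldl_nil]
    symm
    apply List.ext_getElem
    · simp
    · intro d h1 h2
      simp only [List.getElem_mapIdx]
      rw [if_neg (by omega)]
  | succ f ih =>
    intro j0 hf hj L
    have hlt : j0 < n := by omega
    rw [PySem.List.pyRange_one_cons hlt]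
    simp only [List.foldl_cons]
    rw [ih (j0 + 1) (by omega) (by omega)]
    apply pv_mapIdx_modify
    · intro d hd hne
      funext b
      by_cases hc : j0 + 1 - i - 1 ≤ (d : Int) ∧ (d : Int) < n - i - 1
      · rw [if_pos hc, if_pos (by omega)]
      · rw [if_neg hc, if_neg (by omega)]
    · intro h2
      rw [if_neg (by omega), if_pos (by constructor <;> omega)]
      have : i + ((j0 - i - 1).toNat : Int) + 1 = j0 := by omega
      rw [this]

-- outer loop of B: bucket d collects rows i0 ≤ i < n-d-1 in order
theorem pv_B_outer (grid : List (List Int)) (n : Int) :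
    ∀ (i0 : Int), 0 ≤ i0 → ∀ (L : List (List Int)),
      (PySem.List.pyRange i0 n 1).foldl (fun liste i =>
        (PySem.List.pyRange (i + 1) n 1).foldl (fun l j =>
          l.modify (j - i - 1).toNat (fun b => b ++ [pvCell grid i j])) liste) L
      = L.mapIdx (fun d b =>
          b ++ (PySem.List.pyRange i0 (n - (d : Int) - 1) 1).map (fun i => pvCell grid i (i + (d : Int) + 1))) := by
  suffices H : ∀ (fuel : Nat) (i0 : Int), (n - i0).toNat = fuel → 0 ≤ i0 →
      ∀ (L : List (List Int)),
      (PySem.List.pyRange i0 n 1).foldl (fun liste i =>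
        (PySem.List.pyRange (i + 1) n 1).foldl (fun l j =>
          l.modify (j - i - 1).toNat (fun b => b ++ [pvCell grid i j])) liste) L
      = L.mapIdx (fun d b =>
          b ++ (PySem.List.pyRange i0 (n - (d : Int) - 1) 1).map (fun i => pvCell grid i (i + (d : Int) + 1))) by
    intro i0 hi L; exact H _ i0 rfl hi L
  intro fuel
  induction fuel with
  | zero =>
    intro i0 hf hi L
    have hni : n ≤ i0 := by omega
    rw [PySem.List.pyRange_one_eq_nil hni]
    simp only [List.foldl_nil]
    symm
    apply List.ext_getElem
    · simp
    · intro d h1 h2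
      simp only [List.getElem_mapIdx]
      rw [PySem.List.pyRange_one_eq_nil (by omega)]
      simp
  | succ f ih =>
    intro i0 hf hi L
    have hlt : i0 < n := by omega
    rw [PySem.List.pyRange_one_cons hlt]
    simp only [List.foldl_cons]
    rw [pv_B_inner grid n i0 (i0 + 1) (by omega), ih (i0 + 1) (by omega) (by omega),
        pv_mapIdx_mapIdx]
    apply pv_mapIdx_congr
    intro d hd b
    by_cases hc : (d : Int) < n - i0 - 1
    · rw [if_pos (by constructor <;> omega),
        PySem.List.pyRange_one_cons (a := i0) (b := n - (d : Int) - 1) (by omega)]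
      simp [List.append_assoc]
    · rw [if_neg (by omega), PySem.List.pyRange_one_eq_nil (a := i0) (by omega),
        PySem.List.pyRange_one_eq_nil (a := i0 + 1) (by omega)]

theorem pv_AB (grid : List (List Int)) (n : Int) :
    grid_sup grid n = grid_sup_alt grid n := by
  rw [pv_A_eq_map]
  show _ = (PySem.List.pyRange 0 n 1).foldl _ ((PySem.List.pyRange 1 n 1).map (fun _ => []))
  rw [pv_B_outer grid n 0 le_rfl]
  apply List.ext_getElem
  · simp
  · intro k h1 h2
    have hk : k < (PySem.List.pyRange 1 n 1).length := by simpa using h1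
    simp only [List.getElem_map, List.getElem_mapIdx, PySem.List.getElem_pyRange_one]
    rw [List.nil_append]
    have hn : n - (1 + (k : Int)) = n - (k : Int) - 1 := by ring
    rw [hn]
    apply List.map_congr_left
    intro i _
    have : i + (1 + (k : Int)) = i + (k : Int) + 1 := by ring
    rw [this]

-- ===== VERDICT (by name: the statement is the Claim_ definition above) =====
theorem grid_sup_spec : Claim_equal_grid_sup := by
  intro grid n _ _
  exact pv_AB grid n
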